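-- pv_equiv track=rewrite | github.com/gabriel-p-artcls/23-08_UCC | 1_code/combine_DBs.py | assign_fname
-- ===== SOURCE A (Python) =====
-- def rm_chars_from_name(name):
--     """
--     """
--     # name = name.lower().replace('_', '').replace(
--     #     ' ', '').replace('-', '').replace("'", '')
--     # We replace '+' with 'p' to avoid duplicating names for clusters
--     # like 'Juchert J0644.8-0925' and 'Juchert_J0644.8+0925'
--     name = name.lower().replace('_', '').replace(' ', '').replace(
--         '-', '').replace('.', '').replace("'", '').replace('+', 'p')
--     return name
--
-- def assign_fname(all_names):
--     """
--     The first entry in 'all_fnames_reorder' is used for files and urls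
--     """
--     all_names_reorder, all_fnames_reorder = [], []
--     for names in all_names:
--         names = names.split(';')
--         fnames_temp = []
--         for i, name in enumerate(names):
--             name = name.strip()
--             fnames_temp.append(rm_chars_from_name(name))
--
--         names_reorder, fnames_reorder = preferred_names(names, fnames_temp)
--
--         all_names_reorder.append(";".join(names_reorder))
--         # Remove duplicated before storing
--         all_fnames_reorder.append(';'.join(list(dict.fromkeys(
--             fnames_reorder))))
--
--     return all_names_reorder, all_fnames_reorder
--
-- def preferred_names(names, fnames):
--     """
--     Use naming conventions according to this list of preferred names
--     """
--     names_lst = (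
--         'blanco', 'westerlund', 'ngc', 'melotte', 'trumpler', 'ruprecht',
--         'berkeley', 'pismis', 'vdbh', 'loden', 'kronberger', 'collinder',
--         'haffner', 'tombaugh', 'dolidze', 'auner', 'waterloo', 'basel',
--         'bochum', 'hogg', 'carraro', 'lynga', 'johansson', 'mamajek',
--         'platais', 'harvard', 'czernik', 'koposov', 'eso', 'ascc', 'teutsch',
--         'alessi', 'king', 'saurer', 'fsr', 'juchert', 'antalova', 'stephenson')
--
--     # Replace with another name according to the preference list
--     if len(names) == 1:
--         return names, fnames
--
--     # Always move 'MWSC to the last position'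
--     if "mwsc" in fnames[0]:
--         names = names[1:] + [names[0]]
--         fnames = fnames[1:] + [fnames[0]]
--
--     # # Select the first name listed
--     def find_preferred_name(fnames):
--         """Replace with another name according to the preference list"""
--         for name_prefer in names_lst:
--             for i, name in enumerate(fnames):
--                 if name_prefer in name:
--                     return i
--         return None
--
--     def reorder_names(nms_lst, i):
--         nms_reorder = list(nms_lst)
--         name0 = nms_reorder[i]
--         del nms_reorder[i]
--         nms_reorder = [name0] + nms_reorder
--         return nms_reorder
--
--     i = find_preferred_name(fnames)
--     if i is not None:
--         # Reorder
--         names_reorder = reorder_names(names, i)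
--         fnames_reorder = reorder_names(fnames, i)
--     else:
--         names_reorder, fnames_reorder = names, fnames
--
--     return names_reorder, fnames_reorder
-- ===== SOURCE B (Python) =====
-- _PREFS = (
--     'blanco', 'westerlund', 'ngc', 'melotte', 'trumpler', 'ruprecht',
--     'berkeley', 'pismis', 'vdbh', 'loden', 'kronberger', 'collinder',
--     'haffner', 'tombaugh', 'dolidze', 'auner', 'waterloo', 'basel',
--     'bochum', 'hogg', 'carraro', 'lynga', 'johansson', 'mamajek',
--     'platais', 'harvard', 'czernik', 'koposov', 'eso', 'ascc', 'teutsch',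
--     'alessi', 'king', 'saurer', 'fsr', 'juchert', 'antalova', 'stephenson')
--
--
-- def _rm_chars(name):
--     """Same normalization as the original."""
--     return name.lower().replace('_', '').replace(' ', '').replace(
--         '-', '').replace('.', '').replace("'", '').replace('+', 'p')
--
--
-- def _rank(fname):
--     """Index of the first preferred designation contained in fname."""
--     for k, pref in enumerate(_PREFS):
--         if pref in fname:
--             return k
--     return len(_PREFS)
--
--
-- def _select(names, fnames):
--     """Move the best-ranked name to the front (per-name rank + argmin)."""
--     if len(names) > 1:
--         if 'mwsc' in fnames[0]:
--             names = names[1:] + names[:1]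
--             fnames = fnames[1:] + fnames[:1]
--         ranks = [_rank(f) for f in fnames]
--         i = ranks.index(min(ranks))
--         names = [names[i]] + names[:i] + names[i + 1:]
--         fnames = [fnames[i]] + fnames[:i] + fnames[i + 1:]
--     return names, fnames
--
--
-- def _process(entry):
--     names = entry.split(';')
--     fnames = [_rm_chars(n.strip()) for n in names]
--     names, fnames = _select(names, fnames)
--     return ';'.join(names), ';'.join(dict.fromkeys(fnames))
--
--
-- def assign_fname(all_names):
--     rows = [_process(entry) for entry in all_names]
--     return [r[0] for r in rows], [r[1] for r in rows]
-- ===== Notes on version B (the rewrite author's own statement) =====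
-- stated objective: alternative
-- what changed: Replaces the preference-outer/name-inner early-return scan with a per-name rank function (index of the first preferred substring) and an argmin (ranks.index(min(ranks))), and replaces the index/del/prepend reorder with slicing; the outer loop is decomposed into a per-entry helper mapped over the input.
import Mathlib
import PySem

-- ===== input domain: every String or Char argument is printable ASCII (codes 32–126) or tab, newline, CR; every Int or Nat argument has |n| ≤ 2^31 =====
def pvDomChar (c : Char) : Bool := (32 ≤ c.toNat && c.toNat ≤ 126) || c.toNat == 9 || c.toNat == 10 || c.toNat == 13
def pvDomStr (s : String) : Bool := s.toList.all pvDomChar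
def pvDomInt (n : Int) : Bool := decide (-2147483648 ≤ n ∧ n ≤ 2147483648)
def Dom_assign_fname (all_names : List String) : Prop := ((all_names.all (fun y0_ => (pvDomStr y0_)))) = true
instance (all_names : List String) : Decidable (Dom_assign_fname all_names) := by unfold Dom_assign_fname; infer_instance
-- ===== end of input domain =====

-- B replaces A's preference-outer/name-inner early-return scan by a per-name rank plus
-- argmin (ranks.index(min(ranks))) and reorders by slicing; same results, different decomposition.

-- ===== PORT A =====
-- the module-level preference tuple 'names_lst' (shared verbatim by both Pythons)
def pvNamesLst : List String :=
  ["blanco", "westerlund", "ngc", "melotte", "trumpler", "ruprecht",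
   "berkeley", "pismis", "vdbh", "loden", "kronberger", "collinder",
   "haffner", "tombaugh", "dolidze", "auner", "waterloo", "basel",
   "bochum", "hogg", "carraro", "lynga", "johansson", "mamajek",
   "platais", "harvard", "czernik", "koposov", "eso", "ascc", "teutsch",
   "alessi", "king", "saurer", "fsr", "juchert", "antalova", "stephenson"]

-- rm_chars_from_name (identical helper in Source A and Source B)
def rm_chars_from_name (name : String) : String :=
  PySem.Str.replace (PySem.Str.replace (PySem.Str.replace (PySem.Str.replace
    (PySem.Str.replace (PySem.Str.replace (PySem.Str.lower name)
      "_" "") " " "") "-" "") "." "") "'" "") "+" "p"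

-- find_preferred_name: outer loop over the preference list, inner first-index scan
def pvFindPref : List String → List String → Option Nat
  | [], _ => none
  | p :: ps, fnames =>
    match fnames.findIdx? (fun f => PySem.Str.isIn p f) with
    | some i => some i
    | none => pvFindPref ps fnames

-- reorder_names: take element i (always in range at the call site), delete it, prepend it
def pvReorder (nms : List String) (i : Nat) : List String :=
  [PySem.List.pyGetD nms (i : Int) ""] ++ nms.eraseIdx i

-- preferred_names ('fnames[0]' / 'names[0]' via pyGetD: in range on every reachable call,
-- since split(';') always yields a nonempty list)
def preferred_names (names fnames : List String) : List String × List String :=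
  if names.length == 1 then (names, fnames)
  else
    let nf :=
      if PySem.Str.isIn "mwsc" (PySem.List.pyGetD fnames 0 "") then
        (names.drop 1 ++ [PySem.List.pyGetD names 0 ""],
         fnames.drop 1 ++ [PySem.List.pyGetD fnames 0 ""])
      else (names, fnames)
    match pvFindPref pvNamesLst nf.2 with
    | some i => (pvReorder nf.1 i, pvReorder nf.2 i)
    | none => (nf.1, nf.2)

def assign_fname (all_names : List String) : List String × List String :=
  all_names.foldl
    (fun acc row =>
      let names := (PySem.Str.split? row ";").getD []   -- sep ";" ≠ "": never none
      let fnames_temp := names.map (fun n => rm_chars_from_name (PySem.Str.strip n))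
      let r := preferred_names names fnames_temp
      (acc.1 ++ [PySem.Str.join ";" r.1],
       acc.2 ++ [PySem.Str.join ";" (PySem.List.dedup r.2)]))
    ([], [])

-- ===== PORT B =====
-- _rank: index of the first preferred designation contained in fname, else len(_PREFS)
def pvRank (f : String) : Nat :=
  (pvNamesLst.findIdx? (fun p => PySem.Str.isIn p f)).getD pvNamesLst.length

-- [xs[i]] + xs[:i] + xs[i+1:]
def pvFront (xs : List String) (i : Nat) : List String :=
  [PySem.List.pyGetD xs (i : Int) ""] ++ xs.take i ++ xs.drop (i + 1)

-- _select ('min(ranks)' via min?: ranks is nonempty on every reachable call)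
def pvSelect (names fnames : List String) : List String × List String :=
  if 1 < names.length then
    let nf :=
      if PySem.Str.isIn "mwsc" (PySem.List.pyGetD fnames 0 "") then
        (names.drop 1 ++ names.take 1, fnames.drop 1 ++ fnames.take 1)
      else (names, fnames)
    let ranks := nf.2.map pvRank
    let m := (PySem.List.min? ranks (fun r => r)).getD 0
    let i := (PySem.List.index? ranks m).getD 0
    (pvFront nf.1 i, pvFront nf.2 i)
  else (names, fnames)

-- _process
def pvProcess (entry : String) : String × String :=
  let names := (PySem.Str.split? entry ";").getD []   -- sep ";" ≠ "": never none
  let fnames := names.map (fun n => rm_chars_from_name (PySem.Str.strip n))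
  let r := pvSelect names fnames
  (PySem.Str.join ";" r.1, PySem.Str.join ";" (PySem.List.dedup r.2))

def assign_fname_alt (all_names : List String) : List String × List String :=
  let rows := all_names.map pvProcess
  (rows.map (·.1), rows.map (·.2))

-- ===== PRECONDITION & SPEC =====
def Spec_assign_fname (all_names : List String) (out : List String × List String) : Prop := out = assign_fname_alt all_names
instance (all_names : List String) (out : List String × List String) : Decidable (Spec_assign_fname all_names out) := by unfold Spec_assign_fname; infer_instance

-- ===== CLAIM (what is proved, stated in full; the proofs are below) =====
def Claim_equal_assign_fname : Prop := ∀ (all_names : List String), Dom_assign_fname all_names → Spec_assign_fname all_names (assign_fname all_names)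

-- ===== LEMMAS AND PROOFS =====

-- pvRank generalized over the preference list
def rkOf (prefs : List String) (f : String) : Nat :=
  (prefs.findIdx? (fun p => PySem.Str.isIn p f)).getD prefs.length

lemma rkOf_cons (p : String) (ps : List String) (f : String) :
    rkOf (p :: ps) f = if PySem.Str.isIn p f then 0 else rkOf ps f + 1 := by
  simp only [rkOf, List.findIdx?_cons, List.length_cons]
  cases h : PySem.Str.isIn p f
  · cases hf : List.findIdx? (fun q => PySem.Str.isIn q f) ps <;> simp
  · simp

lemma pymin_go : ∀ (as : List Nat) (a : Nat),
    PySem.List.min? (a :: as) (fun r => r) = some (as.foldl min a)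
  | [], _ => rfl
  | x :: xs, a => by
    have h1 : PySem.List.min? (a :: x :: xs) (fun r => r)
        = PySem.List.min? ((if x < a then x else a) :: xs) (fun r => r) := by
      unfold PySem.List.min?
      simp only [List.foldl_cons]
      congr 1
      show (if x < a then some x else some a) = some (if x < a then x else a)
      split <;> rfl
    rw [h1, pymin_go xs (if x < a then x else a)]
    simp only [List.foldl_cons]
    congr 2
    by_cases hx : x < a
    · rw [if_pos hx, Nat.min_def, if_neg (by omega)]
    · rw [if_neg hx, Nat.min_def, if_pos (by omega)]

lemma pymin_eq_min? (l : List Nat) : PySem.List.min? l (fun r => r) = l.min? := by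
  cases l with
  | nil => rfl
  | cons a as =>
    rw [pymin_go as a]
    simp [List.min?]

lemma pvFindPref_cons (p : String) (ps fnames : List String) :
    pvFindPref (p :: ps) fnames =
      match fnames.findIdx? (fun f => PySem.Str.isIn p f) with
      | some i => some i
      | none => pvFindPref ps fnames := rfl

-- the core fact: index-of-min of the per-name ranks is A's nested-scan result (0 when none)
lemma find_argmin (prefs fnames : List String) (h : fnames ≠ []) :
    PySem.List.index? (fnames.map (rkOf prefs))
        ((PySem.List.min? (fnames.map (rkOf prefs)) (fun r => r)).getD 0)
      = some ((pvFindPref prefs fnames).getD 0) := by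
  induction prefs with
  | nil =>
    obtain ⟨a, as, rfl⟩ := List.exists_cons_of_ne_nil h
    have hrk : (a :: as).map (rkOf []) = (a :: as).map (fun _ => 0) :=
      List.map_congr_left (fun f _ => by simp [rkOf])
    rw [hrk]
    have hmin : PySem.List.min? ((a :: as).map (fun _ => (0 : Nat))) (fun r => r) = some 0 := by
      rw [pymin_eq_min?]
      exact List.min?_eq_some_iff.mpr ⟨by simp, fun b _ => Nat.zero_le b⟩
    rw [hmin]
    simp [PySem.List.index?, List.idxOf?, List.findIdx?_cons, pvFindPref]
  | cons p ps ih =>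
    cases hf : fnames.findIdx? (fun f => PySem.Str.isIn p f) with
    | some i =>
      have hA : pvFindPref (p :: ps) fnames = some i := by
        rw [pvFindPref_cons, hf]
      obtain ⟨hlt, hpi, hfirst⟩ := List.findIdx?_eq_some_iff_getElem.mp hf
      have hmem : (0 : Nat) ∈ fnames.map (rkOf (p :: ps)) :=
        List.mem_map.mpr ⟨fnames[i], List.getElem_mem hlt,
          by rw [rkOf_cons, if_pos hpi]⟩
      have hmin : PySem.List.min? (fnames.map (rkOf (p :: ps))) (fun r => r) = some 0 := by
        rw [pymin_eq_min?]
        exact List.min?_eq_some_iff.mpr ⟨hmem, fun b _ => Nat.zero_le b⟩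
      rw [hA, hmin]
      simp only [Option.getD_some]
      have hpred : ((fun n => n == (0 : Nat)) ∘ (rkOf (p :: ps)))
          = fun f => PySem.Str.isIn p f := by
        funext f
        simp only [Function.comp_apply]
        rw [rkOf_cons]
        cases hp : PySem.Str.isIn p f <;> simp
      unfold PySem.List.index? List.idxOf?
      rw [List.findIdx?_map, hpred, hf]
    | none =>
      have hA : pvFindPref (p :: ps) fnames = pvFindPref ps fnames := by
        rw [pvFindPref_cons, hf]
      have hnone := List.findIdx?_eq_none_iff.mp hf
      have hmap : fnames.map (rkOf (p :: ps)) = (fnames.map (rkOf ps)).map (· + 1) := by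
        rw [List.map_map]
        refine List.map_congr_left (fun f hfm => ?_)
        simp only [Function.comp_apply]
        rw [rkOf_cons, hnone f hfm]
        simp
      have hne : fnames.map (rkOf ps) ≠ [] := by
        intro hc; exact h (List.map_eq_nil_iff.mp hc)
      obtain ⟨m, hm⟩ : ∃ m, (fnames.map (rkOf ps)).min? = some m := by
        cases hl : fnames.map (rkOf ps) with
        | nil => exact absurd hl hne
        | cons a as => exact ⟨as.foldl min a, by simp [List.min?]⟩
      obtain ⟨hmmem, hmle⟩ := List.min?_eq_some_iff.mp hm
      have hminS : ((fnames.map (rkOf ps)).map (· + 1)).min? = some (m + 1) :=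
        List.min?_eq_some_iff.mpr ⟨List.mem_map.mpr ⟨m, hmmem, rfl⟩, by
          rintro b hb
          obtain ⟨c, hc, rfl⟩ := List.mem_map.mp hb
          exact Nat.succ_le_succ (hmle c hc)⟩
      rw [hA, hmap, pymin_eq_min?, hminS]
      simp only [Option.getD_some]
      have hidx : PySem.List.index? ((fnames.map (rkOf ps)).map (· + 1)) (m + 1)
          = PySem.List.index? (fnames.map (rkOf ps)) m := by
        unfold PySem.List.index? List.idxOf?
        rw [List.findIdx?_map]
        congr 1
        funext c
        simp only [Function.comp_apply]
        rw [Bool.eq_iff_iff]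
        simp only [beq_iff_eq]
        omega
      rw [hidx]
      have ihx := ih
      rw [pymin_eq_min?, hm] at ihx
      simpa using ihx

lemma take_one_eq (l : List String) (h : l ≠ []) :
    l.take 1 = [PySem.List.pyGetD l 0 ""] := by
  obtain ⟨a, as, rfl⟩ := List.exists_cons_of_ne_nil h
  simp [PySem.List.pyGetD, PySem.List.pyGet?, PySem.List.pyIdx?]

lemma pvFront_zero (l : List String) (h : l ≠ []) : pvFront l 0 = l := by
  obtain ⟨a, as, rfl⟩ := List.exists_cons_of_ne_nil h
  simp [pvFront, PySem.List.pyGetD, PySem.List.pyGet?, PySem.List.pyIdx?]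

lemma pvFront_eq_pvReorder (l : List String) (i : Nat) :
    pvFront l i = pvReorder l i := by
  unfold pvFront pvReorder
  rw [List.eraseIdx_eq_take_drop_succ, List.append_assoc]

-- the post-rotation core: A's match on the nested scan = B's argmin-front move
lemma select_core (nms fns : List String) (hnN : nms ≠ []) (hne : fns ≠ []) :
    (match pvFindPref pvNamesLst fns with
     | some i => (pvReorder nms i, pvReorder fns i)
     | none => (nms, fns)) =
    (pvFront nms ((PySem.List.index? (fns.map pvRank)
        ((PySem.List.min? (fns.map pvRank) (fun r => r)).getD 0)).getD 0),
     pvFront fns ((PySem.List.index? (fns.map pvRank)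
        ((PySem.List.min? (fns.map pvRank) (fun r => r)).getD 0)).getD 0)) := by
  have hrk : pvRank = rkOf pvNamesLst := rfl
  have hargs := find_argmin pvNamesLst fns hne
  rw [hrk]
  cases hp : pvFindPref pvNamesLst fns with
  | some i =>
    rw [hp] at hargs
    rw [hargs]
    simp only [Option.getD_some]
    rw [pvFront_eq_pvReorder fns i, pvFront_eq_pvReorder nms i]
  | none =>
    rw [hp] at hargs
    rw [hargs]
    simp only [Option.getD_some, Option.getD_none]
    rw [pvFront_zero nms hnN, pvFront_zero fns hne]

lemma select_eq (names fnames : List String) (hlen : names.length = fnames.length) :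
    preferred_names names fnames = pvSelect names fnames := by
  match names, fnames with
  | [], fnames =>
    have hf0 : fnames = [] := List.eq_nil_of_length_eq_zero hlen.symm
    subst hf0
    rfl
  | [n], fnames =>
    simp [preferred_names, pvSelect]
  | n :: n2 :: ns2, fnames =>
    have hne : fnames ≠ [] := by
      intro hc; rw [hc] at hlen; simp at hlen
    have hfne1 : fnames.drop 1 ++ [PySem.List.pyGetD fnames 0 ""] ≠ [] := by simp
    simp only [preferred_names, pvSelect]
    rw [take_one_eq (n :: n2 :: ns2) (by simp), take_one_eq fnames hne]
    have hc1 : ((n :: n2 :: ns2).length == 1) = false := by simp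
    have hc2 : 1 < (n :: n2 :: ns2).length := by simp
    rw [hc1, if_pos hc2]
    simp only [Bool.false_eq_true, if_false]
    by_cases hmw : PySem.Str.isIn "mwsc" (PySem.List.pyGetD fnames 0 "") = true
    · rw [if_pos hmw]
      exact select_core _ _ (by simp) hfne1
    · rw [if_neg hmw]
      exact select_core _ _ (by simp) hne

lemma process_eq (row : String) :
    (PySem.Str.join ";" (preferred_names ((PySem.Str.split? row ";").getD [])
        (((PySem.Str.split? row ";").getD []).map (fun n => rm_chars_from_name (PySem.Str.strip n)))).1,
     PySem.Str.join ";" (PySem.List.dedup (preferred_names ((PySem.Str.split? row ";").getD [])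
        (((PySem.Str.split? row ";").getD []).map (fun n => rm_chars_from_name (PySem.Str.strip n)))).2))
      = pvProcess row := by
  unfold pvProcess
  rw [select_eq _ _ (by simp)]

lemma assign_fold (l : List String) : ∀ a b : List String,
    List.foldl (fun acc row =>
      (acc.1 ++ [PySem.Str.join ";" (preferred_names ((PySem.Str.split? row ";").getD [])
          (((PySem.Str.split? row ";").getD []).map (fun n => rm_chars_from_name (PySem.Str.strip n)))).1],
       acc.2 ++ [PySem.Str.join ";" (PySem.List.dedup (preferred_names ((PySem.Str.split? row ";").getD [])
          (((PySem.Str.split? row ";").getD []).map (fun n => rm_chars_from_name (PySem.Str.strip n)))).2)]))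
      (a, b) l
    = (a ++ (l.map pvProcess).map (·.1), b ++ (l.map pvProcess).map (·.2)) := by
  induction l with
  | nil => intro a b; simp
  | cons x xs ih =>
    intro a b
    simp only [List.foldl_cons, List.map_cons]
    rw [ih]
    rw [← process_eq x]
    simp

-- ===== VERDICT (by name: the statement is the Claim_ definition above) =====
theorem assign_fname_spec : Claim_equal_assign_fname := by
  intro all_names _
  show assign_fname all_names = assign_fname_alt all_names
  simp only [assign_fname, assign_fname_alt]
  simpa using assign_fold all_names [] []
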